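-- pv_equiv track=rewrite | github.com/alejotherrera/AED | ParcialFinal/modulos.py | punto8
-- ===== SOURCE A (Python) =====
-- def punto8(cadena):
--     letras = "abcdefghijkmñlopqrstuvwxyzaeiouáéíóú"
--     cont = cant_pal4 = 0
--     flag_t = hay_tb = False
--     for i in cadena:
--         if i in letras:
--             cont += 1
--             if i in "t":
--                 flag_t = True
--             elif flag_t:
--                 if i in "b":
--                     hay_tb = True
--         else:
--             if cont >= 4 and hay_tb:
--                 cant_pal4 += 1
--             cont = 0
--             flag_t = hay_tb = False
--     return cant_pal4
-- ===== SOURCE B (Python) =====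
-- def punto8(cadena):
--     letras = "abcdefghijkmñlopqrstuvwxyzaeiouáéíóú"
--     norm = ''.join(c if c in letras else ' ' for c in cadena)
--     words = norm.split(' ')
--     # words[:-1]: a word only counts when a separator follows it (the trailing run is never counted)
--     return sum(1 for w in words[:-1] if len(w) >= 4 and 'b' in w.partition('t')[2])
-- ===== Notes on version B (the rewrite author's own statement) =====
-- stated objective: idiomatic
-- what changed: Replaces A's per-character flag FSM with a tokenize-then-classify pass: normalise non-letters to spaces, split into words, and count words (except the trailing one) with length >= 4 and a 'b' after the first 't' via str.partition.
import Mathlib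
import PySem

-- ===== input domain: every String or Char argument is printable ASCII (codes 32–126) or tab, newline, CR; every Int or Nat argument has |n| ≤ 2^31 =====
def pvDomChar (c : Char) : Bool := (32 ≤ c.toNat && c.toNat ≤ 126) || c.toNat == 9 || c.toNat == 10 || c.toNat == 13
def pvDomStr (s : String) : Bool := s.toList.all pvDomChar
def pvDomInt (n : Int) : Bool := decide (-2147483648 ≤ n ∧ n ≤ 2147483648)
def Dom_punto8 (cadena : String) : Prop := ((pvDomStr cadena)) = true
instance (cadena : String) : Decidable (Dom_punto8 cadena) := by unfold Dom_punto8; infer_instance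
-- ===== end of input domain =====

-- B replaces A's per-character flag FSM by tokenize-then-classify (normalise separators to
-- spaces, split into words, count the qualifying ones; trailing word excluded). Same O(n) cost.

-- ===== PORT A =====
def pvLetras : List Char := "abcdefghijkmñlopqrstuvwxyzaeiouáéíóú".toList

-- literal transliteration of A's for-loop; state = (cont, cant_pal4, flag_t, hay_tb)
def punto8Loop : List Char → Int → Int → Bool → Bool → Int
  | [], _, cant, _, _ => cant
  | c :: cs, cont, cant, ft, hb =>
    if c ∈ pvLetras then
      let cont := cont + 1
      if c ∈ ['t'] then punto8Loop cs cont cant true hb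
      else if ft then
        if c ∈ ['b'] then punto8Loop cs cont cant ft true
        else punto8Loop cs cont cant ft hb
      else punto8Loop cs cont cant ft hb
    else
      if cont ≥ 4 ∧ hb then punto8Loop cs 0 (cant + 1) false false
      else punto8Loop cs 0 cant false false

def punto8 (cadena : String) : Int := punto8Loop cadena.toList 0 0 false false

-- ===== PORT B =====
-- hand port of Python str.split(' ') (single-char separator, empty pieces kept); exact
def pvSplitSp : List Char → List (List Char)
  | [] => [[]]
  | c :: cs =>
    if c == ' ' then [] :: pvSplitSp cs
    else
      match pvSplitSp cs with
      | w :: ws => (c :: w) :: ws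
      | [] => [[c]]

-- hand port of w.partition('t')[2]: the part after the first 't' ([] when there is no 't'); exact
def pvAfterT (w : List Char) : List Char := (w.dropWhile (fun c => !(c == 't'))).drop 1

def punto8_alt (cadena : String) : Int :=
  let norm := cadena.toList.map (fun c => if c ∈ pvLetras then c else ' ')
  let words := pvSplitSp norm
  (((words.dropLast).filter (fun w => decide (w.length ≥ 4) && ('b' ∈ pvAfterT w))).length : Int)

-- ===== PRECONDITION & SPEC =====
def Spec_punto8 (cadena : String) (out : Int) : Prop := out = punto8_alt cadena
instance (cadena : String) (out : Int) : Decidable (Spec_punto8 cadena out) := by unfold Spec_punto8; infer_instance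

-- ===== CLAIM (what is proved, stated in full; the proofs are below) =====
def Claim_equal_punto8 : Prop := ∀ (cadena : String), Dom_punto8 cadena → Spec_punto8 cadena (punto8 cadena)

-- ===== LEMMAS AND PROOFS =====

-- A's per-letter flag update
def flagStep (ft hb : Bool) (c : Char) : Bool × Bool :=
  if c == 't' then (true, hb)
  else if ft && (c == 'b') then (ft, true)
  else (ft, hb)

def flagRun (ft hb : Bool) : List Char → Bool × Bool
  | [] => (ft, hb)
  | c :: cs => flagRun (flagStep ft hb c).1 (flagStep ft hb c).2 cs

-- count of qualifying words with an incoming partial-word state; the last word never counts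
def countF (cont : Int) (ft hb : Bool) : List (List Char) → Int
  | [] => 0
  | [_] => 0
  | w :: ws => (if cont + w.length ≥ 4 ∧ (flagRun ft hb w).2 = true then 1 else 0)
      + countF 0 false false ws

theorem afterT_sublist (w : List Char) : (pvAfterT w).Sublist w :=
  ((w.dropWhile _).drop_sublist 1).trans (w.dropWhile_sublist _)

theorem mem_of_mem_afterT {w : List Char} (h : 'b' ∈ pvAfterT w) : 'b' ∈ w :=
  (afterT_sublist w).mem h

theorem flagRun_snd (w : List Char) (ft hb : Bool) :
    ((flagRun ft hb w).2 = true) ↔ (hb = true ∨ (ft = true ∧ 'b' ∈ w) ∨ 'b' ∈ pvAfterT w) := by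
  induction w generalizing ft hb with
  | nil => simp [flagRun, pvAfterT]
  | cons c cs ih =>
    rw [flagRun]
    by_cases hct : c = 't'
    · subst hct
      simp only [flagStep, beq_self_eq_true, if_pos]
      rw [ih]
      have hA : pvAfterT ('t' :: cs) = cs := by
        simp [pvAfterT, List.dropWhile]
      rw [hA]
      constructor
      · rintro (h | ⟨-, h⟩ | h)
        · exact Or.inl h
        · exact Or.inr (Or.inr h)
        · exact Or.inr (Or.inr (mem_of_mem_afterT h))
      · rintro (h | ⟨hf, h⟩ | h)
        · exact Or.inl h
        · rcases List.mem_cons.mp h with h | h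
          · exact absurd h (by decide)
          · exact Or.inr (Or.inl ⟨rfl, h⟩)
        · exact Or.inr (Or.inl ⟨rfl, h⟩)
    · have h1 : (c == 't') = false := by simpa using hct
      have hA : pvAfterT (c :: cs) = pvAfterT cs := by
        simp [pvAfterT, List.dropWhile, h1]
      simp only [flagStep, h1, Bool.false_eq_true, if_false]
      by_cases hcb : (ft && (c == 'b')) = true
      · obtain ⟨hf, hc⟩ : ft = true ∧ c = 'b' := by simpa using hcb
        simp only [if_pos hcb]
        rw [ih, hA, hf]
        subst hc
        simp [List.mem_cons]
      · simp only [if_neg hcb]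
        rw [ih, hA]
        cases ft
        · simp
        · have hc : (c == 'b') = false := by
            cases h : (c == 'b') <;> simp_all
          have hcb' : c ≠ 'b' := by simpa using hc
          simp [List.mem_cons]
          tauto

theorem splitSp_ne_nil (cs : List Char) : pvSplitSp cs ≠ [] := by
  cases cs with
  | nil => simp [pvSplitSp]
  | cons c cs =>
    unfold pvSplitSp
    split
    · simp
    · cases h : pvSplitSp cs <;> simp

theorem splitSp_space (l : List Char) : pvSplitSp (' ' :: l) = [] :: pvSplitSp l := by
  simp [pvSplitSp]

theorem splitSp_nonspace {c : Char} (h : (c == ' ') = false) {l : List Char}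
    {w : List Char} {ws : List (List Char)} (hl : pvSplitSp l = w :: ws) :
    pvSplitSp (c :: l) = (c :: w) :: ws := by
  unfold pvSplitSp
  rw [h, hl]
  simp

theorem countF_eq_filter (ws : List (List Char)) :
    countF 0 false false ws =
      ((((ws.dropLast).filter (fun w => decide (w.length ≥ 4) && ('b' ∈ pvAfterT w))).length : Nat) : Int) := by
  induction ws with
  | nil => simp [countF]
  | cons w ws ih =>
    cases ws with
    | nil => simp [countF]
    | cons w' ws' =>
      have hdp : (w :: w' :: ws').dropLast = w :: (w' :: ws').dropLast :=
        List.dropLast_cons_of_ne_nil (List.cons_ne_nil _ _)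
      rw [show countF 0 false false (w :: w' :: ws')
            = (if (0 : Int) + w.length ≥ 4 ∧ (flagRun false false w).2 = true then 1 else 0)
              + countF 0 false false (w' :: ws') from rfl,
        ih, hdp, List.filter_cons]
      have hflag : (flagRun false false w).2 = true ↔ 'b' ∈ pvAfterT w := by
        rw [flagRun_snd]; simp
      by_cases hg : 4 ≤ w.length ∧ 'b' ∈ pvAfterT w
      · have h1 : (0 : Int) + (w.length : Int) ≥ 4 := by
          have := hg.1; omega
        rw [if_pos ⟨h1, hflag.mpr hg.2⟩,
          if_pos (show (decide (w.length ≥ 4) && decide ('b' ∈ pvAfterT w)) = true by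
            simp [hg.1, hg.2])]
        simp only [List.length_cons, Nat.cast_add, Nat.cast_one]
        ring
      · have h2 : ((decide (w.length ≥ 4) && decide ('b' ∈ pvAfterT w)) = true) → False := by
          intro h
          exact hg (by simpa using h)
        rw [if_neg (fun h => hg ⟨by have := h.1; omega, hflag.mp h.2⟩), if_neg h2]
        ring

theorem loop_eq (cs : List Char) : ∀ (cont cant : Int) (ft hb : Bool),
    punto8Loop cs cont cant ft hb
      = cant + countF cont ft hb (pvSplitSp (cs.map (fun c => if c ∈ pvLetras then c else ' '))) := by
  induction cs with
  | nil =>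
    intro cont cant ft hb
    simp [punto8Loop, pvSplitSp, countF]
  | cons c cs ih =>
    intro cont cant ft hb
    rw [List.map_cons]
    obtain ⟨w, ws, hws⟩ : ∃ w ws, pvSplitSp (cs.map (fun c => if c ∈ pvLetras then c else ' ')) = w :: ws := by
      cases h : pvSplitSp (cs.map (fun c => if c ∈ pvLetras then c else ' ')) with
      | nil => exact absurd h (splitSp_ne_nil _)
      | cons w ws => exact ⟨w, ws, rfl⟩
    by_cases hc : c ∈ pvLetras
    · have hspace : (c == ' ') = false := by
        have : c ≠ ' ' := by
          intro h; subst h; revert hc; decide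
        simpa using this
      rw [if_pos hc]
      rw [splitSp_nonspace hspace hws]
      have hcount :
          countF cont ft hb ((c :: w) :: ws)
            = countF (cont + 1) (flagStep ft hb c).1 (flagStep ft hb c).2 (w :: ws) := by
        cases ws with
        | nil => simp [countF]
        | cons a l =>
          show (if cont + ((c :: w).length : Int) ≥ 4 ∧ (flagRun ft hb (c :: w)).2 = true then 1 else 0)
                + countF 0 false false (a :: l)
              = (if cont + 1 + (w.length : Int) ≥ 4
                    ∧ (flagRun (flagStep ft hb c).1 (flagStep ft hb c).2 w).2 = true then 1 else 0)
                + countF 0 false false (a :: l)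
          have h1 : flagRun ft hb (c :: w) = flagRun (flagStep ft hb c).1 (flagStep ft hb c).2 w := rfl
          have h2 : cont + ((c :: w).length : Int) = cont + 1 + (w.length : Int) := by
            simp only [List.length_cons, Nat.cast_add, Nat.cast_one]
            ring
          rw [h1, h2]
      rw [hcount]
      rw [punto8Loop, if_pos hc]
      by_cases hct : c ∈ ['t']
      · have hc' : c = 't' := by simpa using hct
        have hstep : flagStep ft hb c = (true, hb) := by
          subst hc'; simp [flagStep]
        rw [if_pos hct, ih, hws, hstep]
      · have hc' : (c == 't') = false := by simpa using hct
        rw [if_neg hct]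
        cases ft
        · have hstep : flagStep false hb c = (false, hb) := by
            simp [flagStep, hc']
          rw [if_neg (by simp), ih, hws, hstep]
        · by_cases hcb : c ∈ ['b']
          · have hb' : c = 'b' := by simpa using hcb
            have hstep : flagStep true hb c = (true, true) := by
              subst hb'; simp [flagStep, hc']
            rw [if_pos rfl, if_pos hcb, ih, hws, hstep]
          · have hb' : (c == 'b') = false := by simpa using hcb
            have hstep : flagStep true hb c = (true, hb) := by
              simp [flagStep, hc', hb']
            rw [if_pos rfl, if_neg hcb, ih, hws, hstep]
    · have hnorm : (if c ∈ pvLetras then c else ' ') = ' ' := if_neg hc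
      rw [hnorm, splitSp_space, hws]
      have hcF : countF cont ft hb ([] :: w :: ws)
          = (if cont ≥ 4 ∧ hb = true then 1 else 0) + countF 0 false false (w :: ws) := by
        show (if cont + (([] : List Char).length : Int) ≥ 4 ∧ (flagRun ft hb []).2 = true then 1 else 0) + _ = _
        simp [flagRun]
      rw [hcF, ← hws]
      rw [punto8Loop, if_neg hc]
      by_cases hcond : cont ≥ 4 ∧ hb = true
      · rw [if_pos hcond, if_pos hcond, ih]
        ring
      · rw [if_neg hcond, if_neg hcond, ih]
        ring

-- ===== VERDICT (by name: the statement is the Claim_ definition above) =====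
theorem punto8_spec : Claim_equal_punto8 := by
  intro cadena _
  show punto8 cadena = punto8_alt cadena
  rw [punto8, punto8_alt, loop_eq, countF_eq_filter]
  ring
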